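-- pv_equiv track=rewrite | github.com/zyx990426/DailyChallenge | 5.1_LongestSubstringKRepeat_395.py | helper
-- ===== SOURCE A (Python) =====
-- def helper(s, m, k):
--     result = 0
--     dic = {}
--     j = 0
--     count = 0
--     for i in range(len(s)):
--         while j < len(s) and len(dic) <= m:
--             if s[j] in dic:
--                 dic[s[j]] += 1
--             else:
--                 dic[s[j]] = 1
--
--             if dic[s[j]] == k:
--                 count += 1
--
--             if len(dic) == m and count == m:
--                 result = max(result, j - i + 1)
--
--             j += 1
--
--         dic[s[i]] -= 1
--         if dic[s[i]] == k - 1: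
--             count -= 1
--         if dic[s[i]] == 0:
--             dic.pop(s[i], None)
--
--     return result
-- ===== SOURCE B (Python) =====
-- def helper(s, m, k):
--     # For every start i, grow the window rightwards with a fresh frequency
--     # table; `good` counts characters whose frequency has reached k.
--     result = 0
--     n = len(s)
--     for i in range(n):
--         cnt = {}
--         good = 0
--         for j in range(i, n):
--             c = s[j]
--             cnt[c] = cnt.get(c, 0) + 1
--             if cnt[c] == k:
--                 good += 1
--             if len(cnt) == m and good == m:
--                 result = max(result, j - i + 1)
--             if len(cnt) > m:
--                 break
--     return result
-- ===== Notes on version B (the rewrite author's own statement) =====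
-- stated objective: simpler
-- what changed: Replaces the forward-only shared two-pointer window (one dict mutated across starts, with decrement/erase bookkeeping when the left end moves) by an independent per-start rightward scan with a fresh frequency dict, breaking once the distinct count exceeds m; no removal logic at all.
import Mathlib
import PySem

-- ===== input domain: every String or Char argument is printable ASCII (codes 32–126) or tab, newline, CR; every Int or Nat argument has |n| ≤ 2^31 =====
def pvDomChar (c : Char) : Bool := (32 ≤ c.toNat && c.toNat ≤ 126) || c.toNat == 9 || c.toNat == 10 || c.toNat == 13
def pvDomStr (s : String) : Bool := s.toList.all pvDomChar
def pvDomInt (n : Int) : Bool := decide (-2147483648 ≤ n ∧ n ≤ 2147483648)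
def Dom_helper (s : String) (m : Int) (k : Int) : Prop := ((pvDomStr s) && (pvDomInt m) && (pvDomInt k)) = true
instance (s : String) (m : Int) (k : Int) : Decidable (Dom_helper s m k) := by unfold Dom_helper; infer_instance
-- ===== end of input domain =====

-- B replaces the forward-only shared-window two-pointer by an independent per-start
-- rightward scan with a fresh frequency dict (objective: simpler — no removal logic).


-- ===== PORT A =====
-- inner `while j < len(s) and len(dic) <= m: …` loop; fuel = len(s) - j bounds the
-- iteration count exactly (j increases by 1 each pass and the guard needs j < len(s)).
def helperAWhile (cs : List Char) (m k : Int) (i : Nat) :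
    Nat → Nat → PySem.Dict Char Int → Int → Int → Nat × PySem.Dict Char Int × Int × Int
  | 0, j, dic, count, result => (j, dic, count, result)
  | fuel + 1, j, dic, count, result =>
    if j < cs.length ∧ (dic.size : Int) ≤ m then
      let c := cs.getD j ' '
      let dic := if dic.contains c then dic.insert c (dic.getD c 0 + 1) else dic.insert c 1
      let count := if dic.getD c 0 = k then count + 1 else count
      let result := if (dic.size : Int) = m ∧ count = m then max result ((j : Int) - (i : Int) + 1) else result
      helperAWhile cs m k i fuel (j + 1) dic count result
    else (j, dic, count, result)

def helper (s : String) (m : Int) (k : Int) : Int :=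
  let cs := s.toList
  let st := (List.range cs.length).foldl (fun (st : PySem.Dict Char Int × Nat × Int × Int) i =>
      let dic := st.1; let j := st.2.1; let count := st.2.2.1; let result := st.2.2.2
      let w := helperAWhile cs m k i (cs.length - j) j dic count result
      let j := w.1; let dic := w.2.1; let count := w.2.2.1; let result := w.2.2.2
      let c := cs.getD i ' '
      -- dic[s[i]] -= 1 : Python raises KeyError when c is absent; Pre_helper excludes
      -- exactly those inputs (m < 0 with a non-empty s), so getD never supplies its default.
      let v := dic.getD c 0 - 1
      let dic := dic.insert c v
      let count := if v = k - 1 then count - 1 else count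
      let dic := if v = 0 then dic.erase c else dic
      (dic, j, count, result))
    (PySem.Dict.empty, 0, 0, 0)
  st.2.2.2

-- ===== PORT B =====
-- inner `for j in range(i, n): … if len(cnt) > m: break`; fuel = n - i = number of js.
def helperBInner (cs : List Char) (m k : Int) (i : Nat) :
    Nat → Nat → PySem.Dict Char Int → Int → Int → Int
  | 0, _, _, _, result => result
  | fuel + 1, j, cnt, good, result =>
    let c := cs.getD j ' '
    let cnt := cnt.insert c (cnt.getD c 0 + 1)
    let good := if cnt.getD c 0 = k then good + 1 else good
    let result := if (cnt.size : Int) = m ∧ good = m then max result ((j : Int) - (i : Int) + 1) else result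
    if m < (cnt.size : Int) then result
    else helperBInner cs m k i fuel (j + 1) cnt good result

def helper_alt (s : String) (m : Int) (k : Int) : Int :=
  let cs := s.toList
  (List.range cs.length).foldl (fun result i =>
    helperBInner cs m k i (cs.length - i) i PySem.Dict.empty 0 result) 0

-- ===== PRECONDITION & SPEC =====
-- Pre_ excludes exactly the inputs on which Python A raises KeyError: m < 0 with s ≠ ""
-- (the window never grows, so the left-end decrement dic[s[i]] hits a missing key).
def Pre_helper (s : String) (m : Int) (k : Int) : Prop := 0 ≤ m ∨ s = ""
instance (s : String) (m : Int) (k : Int) : Decidable (Pre_helper s m k) := by unfold Pre_helper; infer_instance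
def pvWitness_helper : String × Int × Int := ("aabbcc", 2, 2)

def Spec_helper (s : String) (m : Int) (k : Int) (out : Int) : Prop := out = helper_alt s m k
instance (s : String) (m : Int) (k : Int) (out : Int) : Decidable (Spec_helper s m k out) := by unfold Spec_helper; infer_instance

-- ===== CLAIM (what is proved, stated in full; the proofs are below) =====
def Claim_equal_helper : Prop := ∀ (s : String) (m : Int) (k : Int), Dom_helper s m k → Pre_helper s m k → Spec_helper s m k (helper s m k)

-- ===== LEMMAS AND PROOFS =====

-- ---------- semantic layer: windows of cs ----------
def wnd (cs : List Char) (p q : Nat) : List Char := (cs.drop p).take (q - p)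
def dstN (cs : List Char) (p q : Nat) : Nat := (wnd cs p q).toFinset.card
def gsF (cs : List Char) (k : Int) (p q : Nat) : Finset Char :=
  (wnd cs p q).toFinset.filter (fun c => k ≤ ((wnd cs p q).count c : Int))
def gA (cs : List Char) (k : Int) (p q : Nat) : Int := if 1 ≤ k then ((gsF cs k p q).card : Int) else 0
def GoodW (cs : List Char) (m k : Int) (p q : Nat) : Prop :=
  ((dstN cs p (q+1) : Int) = m ∧ gA cs k p (q+1) = m)
def DInv (cs : List Char) (p q : Nat) (d : PySem.Dict Char Int) : Prop :=
  d.keys.Nodup ∧ ∀ c, d.get? c = if c ∈ wnd cs p q then some (((wnd cs p q).count c : Int)) else none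

-- the value folded in at a passing check
def stepR (cs : List Char) (m k : Int) (i : Nat) (r : Int) (q : Nat) : Int :=
  if (dstN cs i (q+1) : Int) = m ∧ gA cs k i (q+1) = m then max r ((q : Int) - (i : Int) + 1) else r

-- pure model of A's inner while pointer
def extF (cs : List Char) (m : Int) (i : Nat) : Nat → Nat → Nat
  | 0, j => j
  | fuel + 1, j => if j < cs.length ∧ (dstN cs i j : Int) ≤ m then extF cs m i fuel (j+1) else j

def jseq (cs : List Char) (m : Int) : Nat → Nat
  | 0 => 0
  | i + 1 => extF cs m i (cs.length - jseq cs m i) (jseq cs m i)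

def resSeq (cs : List Char) (m k : Int) : Nat → Int
  | 0 => 0
  | i + 1 => (List.range' (jseq cs m i) (jseq cs m (i+1) - jseq cs m i)).foldl (stepR cs m k i) (resSeq cs m k i)

-- ---------- window algebra ----------
lemma wnd_nil (cs : List Char) (p : Nat) : wnd cs p p = [] := by simp [wnd]

lemma wnd_snoc (cs : List Char) (p q : Nat) (h1 : p ≤ q) (h2 : q < cs.length) :
    wnd cs p (q+1) = wnd cs p q ++ [cs.getD q ' '] := by
  unfold wnd
  have h3 : q + 1 - p = (q - p) + 1 := by omega
  rw [h3, List.take_succ]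
  have h4 : (cs.drop p)[q - p]? = some (cs.getD q ' ') := by
    rw [List.getElem?_drop]
    have h5 : p + (q - p) = q := by omega
    rw [h5, List.getElem?_eq_getElem h2, List.getD_eq_getElem?_getD, List.getElem?_eq_getElem h2]
    rfl
  rw [h4]
  rfl

lemma wnd_cons (cs : List Char) (p q : Nat) (h1 : p < q) (h2 : p < cs.length) :
    wnd cs p q = cs.getD p ' ' :: wnd cs (p+1) q := by
  unfold wnd
  rw [List.drop_eq_getElem_cons h2]
  have h3 : q - p = (q - (p+1)) + 1 := by omega
  rw [h3, List.take_succ_cons]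
  rw [List.getD_eq_getElem?_getD, List.getElem?_eq_getElem h2]
  rfl

lemma wnd_split (cs : List Char) (a b c : Nat) (h1 : a ≤ b) (h2 : b ≤ c) :
    wnd cs a c = wnd cs a b ++ wnd cs b c := by
  unfold wnd
  have h3 : c - a = (b - a) + (c - b) := by omega
  rw [h3, List.take_add]
  congr 1
  have h4 : a + (b - a) = b := by omega
  rw [List.drop_drop, h4]

lemma wnd_ne_nil (cs : List Char) (p q : Nat) (h1 : p < q) (h2 : p < cs.length) :
    wnd cs p q ≠ [] := by
  rw [wnd_cons cs p q h1 h2]; simp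

lemma dst_right_mono (cs : List Char) (p : Nat) {q q' : Nat} (h : q ≤ q') :
    dstN cs p q ≤ dstN cs p q' := by
  unfold dstN
  apply Finset.card_le_card
  intro x hx
  simp only [List.mem_toFinset] at *
  have h5 : wnd cs p q = (wnd cs p q').take (q - p) := by
    unfold wnd
    rw [List.take_take]
    congr 1
    omega
  rw [h5] at hx
  exact List.take_subset _ _ hx

lemma dst_left_mono (cs : List Char) {a b : Nat} (q : Nat) (h1 : a ≤ b) (h2 : b ≤ q) :
    dstN cs b q ≤ dstN cs a q := by
  unfold dstN
  apply Finset.card_le_card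
  intro x hx
  simp only [List.mem_toFinset] at *
  rw [wnd_split cs a b q h1 h2]
  exact List.mem_append_right _ hx

lemma count_left_mono (cs : List Char) {a b : Nat} (q : Nat) (h1 : a ≤ b) (h2 : b ≤ q) (c : Char) :
    (wnd cs b q).count c ≤ (wnd cs a q).count c := by
  rw [wnd_split cs a b q h1 h2, List.count_append]
  omega

lemma dst_snoc (cs : List Char) (p q : Nat) (h1 : p ≤ q) (h2 : q < cs.length) :
    dstN cs p (q+1) = dstN cs p q + (if cs.getD q ' ' ∈ wnd cs p q then 0 else 1) := by
  unfold dstN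
  have h3 : (wnd cs p (q+1)).toFinset = insert (cs.getD q ' ') (wnd cs p q).toFinset := by
    rw [wnd_snoc cs p q h1 h2]
    rw [List.toFinset_append]
    simp [Finset.union_comm]
  rw [h3]
  by_cases hc : cs.getD q ' ' ∈ wnd cs p q
  · rw [if_pos hc, Finset.insert_eq_self.mpr (List.mem_toFinset.mpr hc)]
    omega
  · rw [if_neg hc, Finset.card_insert_of_notMem (by rw [List.mem_toFinset]; exact hc)]

lemma dst_pos (cs : List Char) (p q : Nat) (h1 : p < q) (h2 : p < cs.length) :
    1 ≤ dstN cs p q := by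
  unfold dstN
  rw [Nat.one_le_iff_ne_zero, Ne, Finset.card_eq_zero, List.toFinset_eq_empty_iff]
  exact wnd_ne_nil cs p q h1 h2

lemma dst_pos_rev (cs : List Char) (p q : Nat) (h : 1 ≤ dstN cs p q) : p < q ∧ p < cs.length := by
  have h4 : wnd cs p q ≠ [] := by
    intro hnil
    unfold dstN at h
    rw [hnil] at h
    simp at h
  constructor
  · by_contra hq
    push_neg at hq
    apply h4
    unfold wnd
    have : q - p = 0 := by omega
    rw [this]
    simp
  · by_contra hp
    push_neg at hp
    apply h4
    unfold wnd
    rw [List.drop_eq_nil_of_le hp]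
    simp

-- ---------- g-counter algebra ----------
lemma gs_snoc_card (k : Int) (hk : 1 ≤ k) (l : List Char) (c : Char) :
    ((l ++ [c]).toFinset.filter (fun x => k ≤ (((l ++ [c]).count x : Int)))).card
      = (l.toFinset.filter (fun x => k ≤ ((l.count x : Int)))).card
        + (if ((l.count c : Int) + 1 = k) then 1 else 0) := by
  have hmem : ∀ x : Char, x ∈ l ++ [c] ↔ x ∈ l ∨ x = c := by
    intro x; rw [List.mem_append, List.mem_singleton]
  have hcnt_ne : ∀ x, x ≠ c → (l ++ [c]).count x = l.count x := by
    intro x hxc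
    rw [List.count_append,
      List.count_eq_zero_of_not_mem (show x ∉ [c] from by rw [List.mem_singleton]; exact hxc),
      add_zero]
  have hcnt_c : (((l ++ [c]).count c : Int)) = (l.count c : Int) + 1 := by
    rw [List.count_append, List.count_singleton_self]
    push_cast
    ring
  by_cases hk1 : (l.count c : Int) + 1 = k
  · have hcnot : c ∉ l.toFinset.filter (fun x => k ≤ ((l.count x : Int))) := by
      simp only [Finset.mem_filter]
      rintro ⟨-, hle⟩
      omega
    have hset : (l ++ [c]).toFinset.filter (fun x => k ≤ (((l ++ [c]).count x : Int)))
        = insert c (l.toFinset.filter (fun x => k ≤ ((l.count x : Int)))) := by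
      ext x
      rw [Finset.mem_filter, Finset.mem_insert, Finset.mem_filter, List.mem_toFinset,
        List.mem_toFinset, hmem x]
      constructor
      · rintro ⟨hmx, hle⟩
        by_cases hxc : x = c
        · exact Or.inl hxc
        · rw [hcnt_ne x hxc] at hle
          rcases hmx with h | h
          · exact Or.inr ⟨h, hle⟩
          · exact absurd h hxc
      · rintro (hxc | ⟨hmx, hle⟩)
        · subst hxc
          exact ⟨Or.inr rfl, by rw [hcnt_c]; omega⟩
        · by_cases hxc : x = c
          · subst hxc
            exact ⟨Or.inl hmx, by rw [hcnt_c]; omega⟩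
          · exact ⟨Or.inl hmx, by rw [hcnt_ne x hxc]; exact hle⟩
    rw [hset, Finset.card_insert_of_notMem hcnot, if_pos hk1]
  · have hset : (l ++ [c]).toFinset.filter (fun x => k ≤ (((l ++ [c]).count x : Int)))
        = l.toFinset.filter (fun x => k ≤ ((l.count x : Int))) := by
      ext x
      rw [Finset.mem_filter, Finset.mem_filter, List.mem_toFinset, List.mem_toFinset, hmem x]
      constructor
      · rintro ⟨hmx, hle⟩
        by_cases hxc : x = c
        · subst hxc
          rw [hcnt_c] at hle
          have hcl : x ∈ l := by
            by_contra hnm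
            rw [List.count_eq_zero_of_not_mem hnm] at hle hk1
            push_cast at hle hk1
            omega
          exact ⟨hcl, by omega⟩
        · rw [hcnt_ne x hxc] at hle
          rcases hmx with h | h
          · exact ⟨h, hle⟩
          · exact absurd h hxc
      · rintro ⟨hmx, hle⟩
        by_cases hxc : x = c
        · subst hxc
          exact ⟨Or.inl hmx, by rw [hcnt_c]; omega⟩
        · exact ⟨Or.inl hmx, by rw [hcnt_ne x hxc]; exact hle⟩
    rw [hset, if_neg hk1, add_zero]

lemma gA_snoc (cs : List Char) (k : Int) (p q : Nat) (h1 : p ≤ q) (h2 : q < cs.length) :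
    gA cs k p (q+1) = gA cs k p q
      + (if ((wnd cs p q).count (cs.getD q ' ') : Int) + 1 = k then 1 else 0) := by
  unfold gA
  by_cases hk : 1 ≤ k
  · rw [if_pos hk, if_pos hk]
    unfold gsF
    rw [wnd_snoc cs p q h1 h2, gs_snoc_card k hk (wnd cs p q) (cs.getD q ' ')]
    push_cast
    split_ifs <;> push_cast <;> ring
  · rw [if_neg hk, if_neg hk]
    rw [if_neg (by intro hcon; have := Int.natCast_nonneg ((wnd cs p q).count (cs.getD q ' ')); omega)]
    ring

lemma gA_cons (cs : List Char) (k : Int) (p q : Nat) (h1 : p < q) (h2 : p < cs.length) :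
    gA cs k (p+1) q = gA cs k p q
      - (if ((wnd cs p q).count (cs.getD p ' ') : Int) = k then 1 else 0) := by
  have hperm : ((wnd cs (p+1) q) ++ [cs.getD p ' ']).Perm (wnd cs p q) := by
    rw [wnd_cons cs p q h1 h2]
    exact List.perm_append_singleton _ _
  have hcm : cs.getD p ' ' ∈ wnd cs p q := by
    rw [wnd_cons cs p q h1 h2]; exact List.mem_cons_self
  unfold gA
  by_cases hk : 1 ≤ k
  · rw [if_pos hk, if_pos hk]
    have h6 : gsF cs k p q
        = ((wnd cs (p+1) q) ++ [cs.getD p ' ']).toFinset.filter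
            (fun x => k ≤ ((((wnd cs (p+1) q) ++ [cs.getD p ' ']).count x : Int))) := by
      unfold gsF
      rw [← List.toFinset_eq_of_perm _ _ hperm]
      apply Finset.filter_congr
      intro x _
      rw [hperm.count_eq x]
    have h7 : ((wnd cs p q).count (cs.getD p ' ') : Int)
        = ((wnd cs (p+1) q).count (cs.getD p ' ') : Int) + 1 := by
      rw [wnd_cons cs p q h1 h2]
      push_cast [List.count_cons_self]
      ring
    rw [h6, gs_snoc_card k hk _ _, h7]
    unfold gsF
    push_cast
    split_ifs <;> push_cast <;> ring
  · rw [if_neg hk, if_neg hk]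
    rw [if_neg (by
      intro hcon
      have hpos : 0 < (wnd cs p q).count (cs.getD p ' ') := List.count_pos_iff.mpr hcm
      omega)]
    ring

lemma gA_nil (cs : List Char) (k : Int) (p : Nat) : gA cs k p p = 0 := by
  unfold gA gsF; rw [wnd_nil]; simp

-- if the window has exactly m distinct and the g-counter is full, every member char occurs ≥ k times
lemma gs_full (cs : List Char) (m k : Int) (p q : Nat) (hk : 1 ≤ k)
    (hd : (dstN cs p q : Int) = m) (hg : gA cs k p q = m) :
    ∀ c ∈ wnd cs p q, k ≤ ((wnd cs p q).count c : Int) := by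
  intro c hc
  unfold gA at hg
  rw [if_pos hk] at hg
  unfold gsF at hg
  unfold dstN at hd
  have hcard : ((wnd cs p q).toFinset.filter (fun x => k ≤ ((wnd cs p q).count x : Int))).card
      = (wnd cs p q).toFinset.card := by omega
  have hsub := Finset.filter_subset (fun x => k ≤ ((wnd cs p q).count x : Int)) (wnd cs p q).toFinset
  have heq := Finset.eq_of_subset_of_card_le hsub (le_of_eq hcard.symm)
  have hcmem : c ∈ (wnd cs p q).toFinset := List.mem_toFinset.mpr hc
  rw [← heq] at hcmem
  exact (Finset.mem_filter.mp hcmem).2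

lemma gA_of_full (cs : List Char) (k : Int) (p q : Nat) (hk : 1 ≤ k)
    (hfull : ∀ c ∈ wnd cs p q, k ≤ ((wnd cs p q).count c : Int)) :
    gA cs k p q = (dstN cs p q : Int) := by
  have hfs : gsF cs k p q = (wnd cs p q).toFinset := by
    unfold gsF
    exact Finset.filter_true_of_mem (fun x hx => hfull x (List.mem_toFinset.mp hx))
  unfold gA
  rw [if_pos hk, hfs]
  rfl

-- ---------- dict invariant ----------
lemma DInv_empty (cs : List Char) (p : Nat) : DInv cs p p (PySem.Dict.empty) := by
  refine ⟨by simp [PySem.Dict.keys, PySem.Dict.empty], fun c => by simp [PySem.Dict.get?_empty, wnd_nil]⟩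

lemma dict_erase_get?_self (d : PySem.Dict Char Int) (c : Char) : (d.erase c).get? c = none := by
  obtain ⟨items⟩ := d
  simp only [PySem.Dict.erase, PySem.Dict.get?]
  induction items with
  | nil => rfl
  | cons a t ih =>
    by_cases h : a.1 = c
    · rw [List.filter_cons_of_neg (by simp [h])]
      exact ih
    · rw [List.filter_cons_of_pos (by simp [h]), List.find?_cons_of_neg (by simp [h])]
      exact ih

lemma dict_erase_get?_ne (d : PySem.Dict Char Int) (c x : Char) (hx : x ≠ c) :
    (d.erase c).get? x = d.get? x := by
  obtain ⟨items⟩ := d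
  simp only [PySem.Dict.erase, PySem.Dict.get?]
  induction items with
  | nil => rfl
  | cons a t ih =>
    by_cases hac : a.1 = c
    · rw [List.filter_cons_of_neg (by simp [hac])]
      rw [List.find?_cons_of_neg (by
        rw [hac, beq_iff_eq]
        exact fun h => hx h.symm)]
      exact ih
    · rw [List.filter_cons_of_pos (by simp [hac])]
      by_cases hax : a.1 = x
      · rw [List.find?_cons_of_pos (by simp [hax]), List.find?_cons_of_pos (by simp [hax])]
      · rw [List.find?_cons_of_neg (by simp [hax]), List.find?_cons_of_neg (by simp [hax])]
        exact ih

lemma dict_erase_keys_nodup (d : PySem.Dict Char Int) (c : Char) (h : d.keys.Nodup) :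
    (d.erase c).keys.Nodup := by
  have hsub : (d.erase c).keys.Sublist d.keys := by
    simp only [PySem.Dict.erase, PySem.Dict.keys]
    exact List.Sublist.map _ List.filter_sublist
  exact List.Nodup.sublist hsub h

lemma DInv.getD0 {cs : List Char} {p q : Nat} {d : PySem.Dict Char Int} (h : DInv cs p q d) (c : Char) :
    d.getD c 0 = ((wnd cs p q).count c : Int) := by
  rcases h with ⟨-, hget⟩
  rw [PySem.Dict.getD_eq_get?_getD, hget c]
  by_cases hc : c ∈ wnd cs p q
  · rw [if_pos hc]; rfl
  · rw [if_neg hc]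
    simp [List.count_eq_zero_of_not_mem hc]

lemma DInv.size_eq {cs : List Char} {p q : Nat} {d : PySem.Dict Char Int} (h : DInv cs p q d) :
    d.size = dstN cs p q := by
  rcases h with ⟨hnd, hget⟩
  have hmem : ∀ c, c ∈ d.keys ↔ c ∈ wnd cs p q := by
    intro c
    constructor
    · intro hc
      by_contra hw
      have h5 := hget c
      rw [if_neg hw] at h5
      exact ((PySem.Dict.get?_eq_none_iff_not_mem_keys d c).mp h5) hc
    · intro hw
      by_contra hc
      have h5 := hget c
      rw [if_pos hw, (PySem.Dict.get?_eq_none_iff_not_mem_keys d c).mpr hc] at h5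
      simp at h5
  have h6 : d.size = d.keys.length := by
    simp [PySem.Dict.size, PySem.Dict.keys]
  rw [h6]
  unfold dstN
  rw [← List.toFinset_card_of_nodup hnd]
  congr 1
  apply Finset.ext
  intro x
  simp [List.mem_toFinset, hmem x]

lemma DInv_addStep {cs : List Char} {p q : Nat} {d : PySem.Dict Char Int}
    (h : DInv cs p q d) (h1 : p ≤ q) (h2 : q < cs.length) :
    DInv cs p (q+1) (d.insert (cs.getD q ' ') (d.getD (cs.getD q ' ') 0 + 1)) := by
  have hgd := DInv.getD0 h (cs.getD q ' ')
  obtain ⟨hnd, hget⟩ := h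
  constructor
  · exact PySem.Dict.nodup_keys_insert _ _ _ hnd
  · intro x
    rw [PySem.Dict.get?_insert, wnd_snoc cs p q h1 h2]
    by_cases hx : x = cs.getD q ' '
    · subst hx
      rw [if_pos rfl, if_pos (List.mem_append_right _ (by simp))]
      rw [hgd]
      congr 1
      rw [List.count_append, List.count_singleton_self]
      push_cast
      ring
    · rw [if_neg hx, hget x]
      have hmm : (x ∈ wnd cs p q ++ [cs.getD q ' ']) ↔ x ∈ wnd cs p q := by
        rw [List.mem_append, List.mem_singleton]
        simp only [hx, or_false]
      have hcc : (wnd cs p q ++ [cs.getD q ' ']).count x = (wnd cs p q).count x := by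
        rw [List.count_append,
          List.count_eq_zero_of_not_mem (show x ∉ [cs.getD q ' '] from by
            rw [List.mem_singleton]; exact hx),
          add_zero]
      simp only [hmm, hcc]

lemma DInv_remove {cs : List Char} {p q : Nat} {d : PySem.Dict Char Int}
    (h : DInv cs p q d) (h1 : p < q) (h2 : p < cs.length) :
    DInv cs (p+1) q
      (if d.getD (cs.getD p ' ') 0 - 1 = 0
        then (d.insert (cs.getD p ' ') (d.getD (cs.getD p ' ') 0 - 1)).erase (cs.getD p ' ')
        else d.insert (cs.getD p ' ') (d.getD (cs.getD p ' ') 0 - 1)) := by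
  have hw : wnd cs p q = cs.getD p ' ' :: wnd cs (p+1) q := wnd_cons cs p q h1 h2
  have hgd := DInv.getD0 h (cs.getD p ' ')
  obtain ⟨hnd, hget⟩ := h
  have hcnt0 : d.getD (cs.getD p ' ') 0 = ((wnd cs (p+1) q).count (cs.getD p ' ') : Int) + 1 := by
    rw [hgd, hw, List.count_cons_self]
    push_cast
    ring
  have hcnt_ne : ∀ x, x ≠ cs.getD p ' ' → (wnd cs p q).count x = (wnd cs (p+1) q).count x := by
    intro x hx
    rw [hw, List.count_cons, if_neg (by rw [beq_iff_eq]; exact fun h => hx h.symm), add_zero]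
  by_cases hz : (wnd cs (p+1) q).count (cs.getD p ' ') = 0
  · rw [if_pos (by rw [hcnt0, hz]; norm_num)]
    have hnm : cs.getD p ' ' ∉ wnd cs (p+1) q := List.count_eq_zero.mp hz
    constructor
    · exact dict_erase_keys_nodup _ _ (PySem.Dict.nodup_keys_insert _ _ _ hnd)
    · intro x
      by_cases hx : x = cs.getD p ' '
      · subst hx
        rw [dict_erase_get?_self, if_neg hnm]
      · rw [dict_erase_get?_ne _ _ _ hx, PySem.Dict.get?_insert, if_neg hx, hget x]
        have hmm : (x ∈ wnd cs p q) ↔ x ∈ wnd cs (p+1) q := by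
          rw [hw, List.mem_cons]
          simp only [hx, false_or]
        simp only [hmm, hcnt_ne x hx]
  · rw [if_neg (by rw [hcnt0]; intro hcon; omega)]
    have hpos : cs.getD p ' ' ∈ wnd cs (p+1) q := by
      rw [← List.count_pos_iff]
      omega
    constructor
    · exact PySem.Dict.nodup_keys_insert _ _ _ hnd
    · intro x
      by_cases hx : x = cs.getD p ' '
      · subst hx
        rw [PySem.Dict.get?_insert, if_pos rfl, if_pos hpos, hcnt0]
        congr 1
        ring
      · rw [PySem.Dict.get?_insert, if_neg hx, hget x]
        have hmm : (x ∈ wnd cs p q) ↔ x ∈ wnd cs (p+1) q := by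
          rw [hw, List.mem_cons]
          simp only [hx, false_or]
        simp only [hmm, hcnt_ne x hx]

-- ---------- extF / jseq facts ----------
lemma extF_ge (cs : List Char) (m : Int) (i : Nat) : ∀ fuel j, j ≤ extF cs m i fuel j := by
  intro fuel
  induction fuel with
  | zero => intro j; simp [extF]
  | succ f ih =>
    intro j
    rw [extF]
    split
    · exact le_trans (Nat.le_succ j) (ih (j+1))
    · exact le_rfl

lemma extF_le (cs : List Char) (m : Int) (i : Nat) : ∀ fuel j, extF cs m i fuel j ≤ j + fuel := by
  intro fuel
  induction fuel with
  | zero => intro j; simp [extF]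
  | succ f ih =>
    intro j
    rw [extF]
    split
    · exact le_trans (ih (j+1)) (by omega)
    · omega

lemma extF_stop (cs : List Char) (m : Int) (i : Nat) :
    ∀ fuel j, cs.length ≤ j + fuel →
      ¬(extF cs m i fuel j < cs.length ∧ (dstN cs i (extF cs m i fuel j) : Int) ≤ m) := by
  intro fuel
  induction fuel with
  | zero => intro j h; simp [extF]; omega
  | succ f ih =>
    intro j h
    rw [extF]
    split
    · exact ih (j+1) (by omega)
    · assumption

lemma extF_mid (cs : List Char) (m : Int) (i : Nat) :
    ∀ fuel j t, j ≤ t → t < extF cs m i fuel j → t < cs.length ∧ (dstN cs i t : Int) ≤ m := by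
  intro fuel
  induction fuel with
  | zero => intro j t h1 h2; simp [extF] at h2; omega
  | succ f ih =>
    intro j t h1 h2
    rw [extF] at h2
    split at h2
    · rename_i hcond
      by_cases ht : t = j
      · subst ht; exact hcond
      · exact ih (j+1) t (by omega) h2
    · omega

lemma jseq_le (cs : List Char) (m : Int) : ∀ i, jseq cs m i ≤ cs.length := by
  intro i
  induction i with
  | zero => simp [jseq]
  | succ i ih =>
    rw [jseq]
    have := extF_le cs m i (cs.length - jseq cs m i) (jseq cs m i)
    omega

lemma jseq_mono (cs : List Char) (m : Int) (i : Nat) : jseq cs m i ≤ jseq cs m (i+1) := by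
  exact extF_ge cs m i _ _

lemma jseq_succ_ge (cs : List Char) (m : Int) (hm : 0 ≤ m) (i : Nat) (hi : i ≤ jseq cs m i)
    (hin : i < cs.length) : i + 1 ≤ jseq cs m (i+1) := by
  rw [jseq]
  by_cases hj : i + 1 ≤ jseq cs m i
  · exact le_trans hj (extF_ge cs m i _ _)
  · have hji : jseq cs m i = i := by omega
    rw [hji]
    have hfuel : cs.length - i = (cs.length - i - 1) + 1 := by omega
    rw [hfuel, extF]
    rw [if_pos ⟨hin, by rw [show dstN cs i i = 0 from by simp [dstN, wnd_nil]]; exact_mod_cast hm⟩]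
    exact extF_ge cs m i _ _

lemma jseq_ge_self (cs : List Char) (m : Int) (hm : 0 ≤ m) : ∀ i, i ≤ cs.length → i ≤ jseq cs m i := by
  intro i
  induction i with
  | zero => intro _; exact Nat.zero_le _
  | succ i ih =>
    intro h
    exact jseq_succ_ge cs m hm i (ih (by omega)) (by omega)

lemma jseq_cross (cs : List Char) (m : Int) (q : Nat) :
    ∀ p, q < jseq cs m p → ∃ i', i' < p ∧ jseq cs m i' ≤ q ∧ q < jseq cs m (i'+1) := by
  intro p
  induction p with
  | zero => intro h; simp [jseq] at h
  | succ p ih =>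
    intro h
    by_cases hp : jseq cs m p ≤ q
    · exact ⟨p, Nat.lt_succ_self p, hp, h⟩
    · obtain ⟨i', h1, h2, h3⟩ := ih (by omega)
      exact ⟨i', by omega, h2, h3⟩

-- ---------- generic fold bounds ----------
lemma foldl_ge_start (f : Int → Nat → Int) (h : ∀ r x, r ≤ f r x) :
    ∀ (l : List Nat) (r : Int), r ≤ l.foldl f r := by
  intro l
  induction l with
  | nil => intro r; simp
  | cons a t ih => intro r; exact le_trans (h r a) (ih (f r a))

lemma foldl_ge_elem (f : Int → Nat → Int) (h : ∀ r x, r ≤ f r x) (g : Int) (x : Nat)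
    (hg : ∀ r, g ≤ f r x) : ∀ (l : List Nat) (r : Int), x ∈ l → g ≤ l.foldl f r := by
  intro l
  induction l with
  | nil => intro r hx; simp at hx
  | cons a t ih =>
    intro r hx
    rcases List.mem_cons.mp hx with h1 | h1
    · subst h1
      exact le_trans (hg r) (foldl_ge_start f h t _)
    · exact ih (f r a) h1

lemma foldl_le_bound (f : Int → Nat → Int) (X : Int) :
    ∀ (l : List Nat) (r : Int), (∀ r' x, x ∈ l → r' ≤ X → f r' x ≤ X) → r ≤ X → l.foldl f r ≤ X := by
  intro l
  induction l with
  | nil => intro r _ hr; simpa using hr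
  | cons a t ih =>
    intro r hstep hr
    exact ih (f r a) (fun r' x hx => hstep r' x (List.mem_cons_of_mem a hx))
      (hstep r a (List.mem_cons_self) hr)

lemma stepR_ge (cs : List Char) (m k : Int) (i : Nat) : ∀ r q, r ≤ stepR cs m k i r q := by
  intro r q; unfold stepR; split
  · exact le_max_left _ _
  · exact le_rfl

lemma stepR_good (cs : List Char) (m k : Int) (i q : Nat) (hg : GoodW cs m k i q) :
    ∀ r, (q : Int) - i + 1 ≤ stepR cs m k i r q := by
  intro r; unfold stepR; rw [if_pos (show (dstN cs i (q+1) : Int) = m ∧ gA cs k i (q+1) = m from hg)]; exact le_max_right _ _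

lemma foldl_stepR_nop (cs : List Char) (m k : Int) (i : Nat) :
    ∀ (l : List Nat) (r : Int), (∀ q ∈ l, ¬ GoodW cs m k i q) → l.foldl (stepR cs m k i) r = r := by
  intro l
  induction l with
  | nil => intro r _; rfl
  | cons a t ih =>
    intro r hng
    have ha : stepR cs m k i r a = r := by
      unfold stepR
      rw [if_neg (show ¬(((dstN cs i (a+1) : Int)) = m ∧ gA cs k i (a+1) = m) from hng a List.mem_cons_self)]
    simp only [List.foldl_cons, ha]
    exact ih r (fun q hq => hng q (List.mem_cons_of_mem a hq))

-- ---------- A's loops against the model ----------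
lemma whileA_eq (cs : List Char) (m k : Int) (i : Nat) :
    ∀ fuel j (dic : PySem.Dict Char Int) (r : Int), cs.length ≤ j + fuel → i ≤ j → DInv cs i j dic →
      ∃ dic', helperAWhile cs m k i fuel j dic (gA cs k i j) r
          = (extF cs m i fuel j, dic', gA cs k i (extF cs m i fuel j),
             (List.range' j (extF cs m i fuel j - j)).foldl (stepR cs m k i) r)
        ∧ DInv cs i (extF cs m i fuel j) dic' := by
  intro fuel
  induction fuel with
  | zero =>
    intro j dic r hlen hij hInv
    refine ⟨dic, ?_, by simpa [extF] using hInv⟩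
    simp [helperAWhile, extF]
  | succ f ih =>
    intro j dic r hlen hij hInv
    by_cases hc : j < cs.length ∧ (dstN cs i j : Int) ≤ m
    · have hcond : j < cs.length ∧ ((dic.size : Int)) ≤ m := by
        rw [DInv.size_eq hInv]; exact hc
      have hdic1 : (if dic.contains (cs.getD j ' ')
            then dic.insert (cs.getD j ' ') (dic.getD (cs.getD j ' ') 0 + 1)
            else dic.insert (cs.getD j ' ') 1)
          = dic.insert (cs.getD j ' ') (dic.getD (cs.getD j ' ') 0 + 1) := by
        by_cases hct : dic.contains (cs.getD j ' ')
        · rw [if_pos hct]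
        · rw [if_neg hct, PySem.Dict.getD_of_not_contains _ _ (by simpa using hct)]
          norm_num
      have hInv' : DInv cs i (j+1) (dic.insert (cs.getD j ' ') (dic.getD (cs.getD j ' ') 0 + 1)) :=
        DInv_addStep hInv hij hc.1
      have hcc : ((wnd cs i (j+1)).count (cs.getD j ' ') : Int)
          = ((wnd cs i j).count (cs.getD j ' ') : Int) + 1 := by
        rw [wnd_snoc cs i j hij hc.1, List.count_append, List.count_singleton_self]
        push_cast
        ring
      have hcupd : (if (dic.insert (cs.getD j ' ') (dic.getD (cs.getD j ' ') 0 + 1)).getD (cs.getD j ' ') 0 = k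
            then gA cs k i j + 1 else gA cs k i j) = gA cs k i (j+1) := by
        rw [DInv.getD0 hInv' (cs.getD j ' '), gA_snoc cs k i j hij hc.1, hcc]
        split_ifs <;> omega
      have hresupd : (if (((dic.insert (cs.getD j ' ') (dic.getD (cs.getD j ' ') 0 + 1)).size : Int)) = m ∧ gA cs k i (j+1) = m
            then max r ((j : Int) - (i : Int) + 1) else r) = stepR cs m k i r j := by
        rw [DInv.size_eq hInv']
        unfold stepR
        rfl
      have hE : extF cs m i (f+1) j = extF cs m i f (j+1) := by rw [extF, if_pos hc]
      obtain ⟨dic', hrec, hinv2⟩ := ih (j+1) (dic.insert (cs.getD j ' ') (dic.getD (cs.getD j ' ') 0 + 1))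
        (stepR cs m k i r j) (by omega) (by omega) hInv'
      refine ⟨dic', ?_, by rw [hE]; exact hinv2⟩
      rw [hE]
      simp only [helperAWhile]
      rw [if_pos hcond]
      rw [hdic1, hcupd, hresupd, hrec]
      have hej : j + 1 ≤ extF cs m i f (j+1) := extF_ge cs m i f (j+1)
      have hsplit : List.range' j (extF cs m i f (j+1) - j)
          = j :: List.range' (j+1) (extF cs m i f (j+1) - (j+1)) := by
        have h9 : extF cs m i f (j+1) - j = (extF cs m i f (j+1) - (j+1)) + 1 := by omega
        rw [h9, List.range'_succ]
      rw [hsplit]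
      simp [List.foldl_cons]
    · have hcond : ¬(j < cs.length ∧ ((dic.size : Int)) ≤ m) := by
        rw [DInv.size_eq hInv]; exact hc
      have hE : extF cs m i (f+1) j = j := by rw [extF, if_neg hc]
      refine ⟨dic, ?_, by rw [hE]; exact hInv⟩
      rw [hE]
      simp only [helperAWhile]
      rw [if_neg hcond, Nat.sub_self]
      rfl

def aBody (cs : List Char) (m k : Int) (st : PySem.Dict Char Int × Nat × Int × Int) (i : Nat) :
    PySem.Dict Char Int × Nat × Int × Int :=
  let dic := st.1; let j := st.2.1; let count := st.2.2.1; let result := st.2.2.2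
  let w := helperAWhile cs m k i (cs.length - j) j dic count result
  let j := w.1; let dic := w.2.1; let count := w.2.2.1; let result := w.2.2.2
  let c := cs.getD i ' '
  let v := dic.getD c 0 - 1
  let dic := dic.insert c v
  let count := if v = k - 1 then count - 1 else count
  let dic := if v = 0 then dic.erase c else dic
  (dic, j, count, result)

lemma helperA_foldl (s : String) (m k : Int) :
    helper s m k = ((List.range s.toList.length).foldl (aBody s.toList m k)
      (PySem.Dict.empty, 0, 0, 0)).2.2.2 := rfl

lemma masterA (cs : List Char) (m k : Int) (hm : 0 ≤ m) :
    ∀ i, i ≤ cs.length → ∃ dic,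
      (List.range i).foldl (aBody cs m k) (PySem.Dict.empty, 0, 0, 0)
        = (dic, jseq cs m i, gA cs k i (jseq cs m i), resSeq cs m k i)
      ∧ DInv cs i (jseq cs m i) dic ∧ i ≤ jseq cs m i := by
  intro i
  induction i with
  | zero =>
    intro _
    refine ⟨PySem.Dict.empty, ?_, ?_, ?_⟩
    · show (PySem.Dict.empty, 0, 0, 0) = _
      rw [show jseq cs m 0 = 0 from rfl, gA_nil, show resSeq cs m k 0 = 0 from rfl]
    · show DInv cs 0 (jseq cs m 0) PySem.Dict.empty
      rw [show jseq cs m 0 = 0 from rfl]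
      exact DInv_empty cs 0
    · exact Nat.zero_le _
  | succ i ih =>
    intro hi1
    obtain ⟨dic, hFold, hInv, hij⟩ := ih (by omega)
    have hin : i < cs.length := by omega
    have hjle : jseq cs m i ≤ cs.length := jseq_le cs m i
    obtain ⟨dic', hw, hInv'⟩ := whileA_eq cs m k i (cs.length - jseq cs m i) (jseq cs m i) dic
      (resSeq cs m k i) (by omega) hij hInv
    have hE : extF cs m i (cs.length - jseq cs m i) (jseq cs m i) = jseq cs m (i+1) := by
      rw [jseq]
    rw [hE] at hw hInv'
    have hiE : i < jseq cs m (i+1) := by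
      have := jseq_succ_ge cs m hm i hij hin
      omega
    have hgupd : (if dic'.getD (cs.getD i ' ') 0 - 1 = k - 1
          then gA cs k i (jseq cs m (i+1)) - 1 else gA cs k i (jseq cs m (i+1)))
        = gA cs k (i+1) (jseq cs m (i+1)) := by
      rw [DInv.getD0 hInv' (cs.getD i ' '), gA_cons cs k i (jseq cs m (i+1)) hiE hin]
      split_ifs <;> omega
    have hInv2 := DInv_remove hInv' hiE hin
    refine ⟨_, ?_, hInv2, by omega⟩
    rw [List.range_succ, List.foldl_append, hFold]
    simp only [List.foldl_cons, List.foldl_nil]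
    simp only [aBody]
    rw [hw]
    simp only
    rw [hgupd]
    rw [show resSeq cs m k (i+1)
        = (List.range' (jseq cs m i) (jseq cs m (i+1) - jseq cs m i)).foldl (stepR cs m k i) (resSeq cs m k i)
      from by rw [resSeq]]

lemma helperA_resSeq (s : String) (m k : Int) (hm : 0 ≤ m) :
    helper s m k = resSeq s.toList m k s.toList.length := by
  obtain ⟨dic, h1, -, -⟩ := masterA s.toList m k hm s.toList.length le_rfl
  rw [helperA_foldl, h1]

-- ---------- B's loops against the model ----------
lemma innerB_eq (cs : List Char) (m k : Int) (i : Nat) :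
    ∀ fuel j (cnt : PySem.Dict Char Int) (r : Int), cs.length = j + fuel → i ≤ j → DInv cs i j cnt →
      helperBInner cs m k i fuel j cnt (gA cs k i j) r
        = (List.range' j fuel).foldl (stepR cs m k i) r := by
  intro fuel
  induction fuel with
  | zero =>
    intro j cnt r hlen hij hInv
    simp [helperBInner]
  | succ f ih =>
    intro j cnt r hlen hij hInv
    have hjn : j < cs.length := by omega
    have hInv' : DInv cs i (j+1) (cnt.insert (cs.getD j ' ') (cnt.getD (cs.getD j ' ') 0 + 1)) :=
      DInv_addStep hInv hij hjn
    have hcc : ((wnd cs i (j+1)).count (cs.getD j ' ') : Int)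
        = ((wnd cs i j).count (cs.getD j ' ') : Int) + 1 := by
      rw [wnd_snoc cs i j hij hjn, List.count_append, List.count_singleton_self]
      push_cast
      ring
    have hcupd : (if (cnt.insert (cs.getD j ' ') (cnt.getD (cs.getD j ' ') 0 + 1)).getD (cs.getD j ' ') 0 = k
          then gA cs k i j + 1 else gA cs k i j) = gA cs k i (j+1) := by
      rw [DInv.getD0 hInv' (cs.getD j ' '), gA_snoc cs k i j hij hjn, hcc]
      split_ifs <;> omega
    have hresupd : (if (((cnt.insert (cs.getD j ' ') (cnt.getD (cs.getD j ' ') 0 + 1)).size : Int)) = m ∧ gA cs k i (j+1) = m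
          then max r ((j : Int) - (i : Int) + 1) else r) = stepR cs m k i r j := by
      rw [DInv.size_eq hInv']
      unfold stepR
      rfl
    have hsz : ((cnt.insert (cs.getD j ' ') (cnt.getD (cs.getD j ' ') 0 + 1)).size : Int) = (dstN cs i (j+1) : Int) := by
      rw [DInv.size_eq hInv']
    rw [List.range'_succ]
    simp only [helperBInner]
    rw [hcupd, hresupd, hsz]
    simp only [List.foldl_cons]
    by_cases hbr : m < (dstN cs i (j+1) : Int)
    · rw [if_pos hbr]
      rw [foldl_stepR_nop cs m k i _ _ ?_]
      intro x hx
      rw [List.mem_range'_1] at hx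
      rintro ⟨hdg, -⟩
      have hmono := dst_right_mono cs i (show j + 1 ≤ x + 1 by omega)
      omega
    · rw [if_neg hbr]
      exact ih (j+1) _ (stepR cs m k i r j) (by omega) (by omega) hInv'

lemma helperB_eq (s : String) (m k : Int) :
    helper_alt s m k = (List.range s.toList.length).foldl
      (fun r i => (List.range' i (s.toList.length - i)).foldl (stepR s.toList m k i) r) 0 := by
  have hone : ∀ i, i < s.toList.length → ∀ r : Int,
      helperBInner s.toList m k i (s.toList.length - i) i PySem.Dict.empty 0 r
        = (List.range' i (s.toList.length - i)).foldl (stepR s.toList m k i) r := by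
    intro i hi r
    have h0 := innerB_eq s.toList m k i (s.toList.length - i) i PySem.Dict.empty r
      (by omega) le_rfl (DInv_empty s.toList i)
    rw [gA_nil] at h0
    exact h0
  have h0 : helper_alt s m k = (List.range s.toList.length).foldl
      (fun result i => helperBInner s.toList m k i (s.toList.length - i) i PySem.Dict.empty 0 result) 0 := rfl
  rw [h0]
  have hcong : ∀ (l : List Nat) (r : Int), (∀ i ∈ l, i < s.toList.length) →
      l.foldl (fun result i => helperBInner s.toList m k i (s.toList.length - i) i PySem.Dict.empty 0 result) r
        = l.foldl (fun r i => (List.range' i (s.toList.length - i)).foldl (stepR s.toList m k i) r) r := by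
    intro l
    induction l with
    | nil => intro r _; rfl
    | cons a t ihl =>
      intro r hml
      simp only [List.foldl_cons]
      rw [hone a (hml a List.mem_cons_self) r]
      exact ihl _ (fun i hi => hml i (List.mem_cons_of_mem a hi))
  exact hcong _ 0 (fun i hi => List.mem_range.mp hi)

-- ---------- the two inequalities ----------
lemma B_ge_good (cs : List Char) (m k : Int) (n : Nat) (hn : n = cs.length)
    (i q : Nat) (hiq : i ≤ q) (hq : q < n) (hg : GoodW cs m k i q) :
    (q : Int) - i + 1 ≤ (List.range n).foldl
      (fun r i => (List.range' i (n - i)).foldl (stepR cs m k i) r) 0 := by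
  apply foldl_ge_elem _ (fun r x => foldl_ge_start _ (stepR_ge cs m k x) _ r) _ i ?_ _ 0
    (List.mem_range.mpr (by omega))
  intro r
  apply foldl_ge_elem _ (stepR_ge cs m k i) _ q (stepR_good cs m k i q hg) _ r
  rw [List.mem_range'_1]
  omega

lemma resSeq_mono (cs : List Char) (m k : Int) : ∀ {a b : Nat}, a ≤ b → resSeq cs m k a ≤ resSeq cs m k b := by
  intro a b hab
  induction b with
  | zero =>
    have h0 : a = 0 := by omega
    subst h0
    exact le_rfl
  | succ b ihb =>
    rcases Nat.lt_or_ge a (b+1) with h | h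
    · refine le_trans (ihb (by omega)) ?_
      rw [resSeq]
      exact foldl_ge_start _ (stepR_ge cs m k b) _ _
    · have h0 : a = b + 1 := by omega
      subst h0
      exact le_rfl

lemma R_rec (cs : List Char) (m k : Int) (i q : Nat) (hq1 : jseq cs m i ≤ q) (hq2 : q < jseq cs m (i+1))
    (hg : GoodW cs m k i q) (n : Nat) (hn : i + 1 ≤ n) :
    (q : Int) - i + 1 ≤ resSeq cs m k n := by
  have h2 : (q : Int) - i + 1 ≤ resSeq cs m k (i+1) := by
    rw [resSeq]
    apply foldl_ge_elem _ (stepR_ge cs m k i) _ q (stepR_good cs m k i q hg) _ _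
    rw [List.mem_range'_1]
    have := jseq_mono cs m i
    omega
  exact le_trans h2 (resSeq_mono cs m k hn)

lemma good_m_k_pos (cs : List Char) (m k : Int) (p q : Nat) (hpq : p ≤ q) (hq : q < cs.length)
    (hg : GoodW cs m k p q) : 1 ≤ m ∧ 1 ≤ k := by
  obtain ⟨hd, hg⟩ := hg
  have hm1 : 1 ≤ dstN cs p (q+1) := dst_pos cs p (q+1) (by omega) (by omega)
  constructor
  · omega
  · by_contra hk
    rw [show gA cs k p (q+1) = 0 from by unfold gA; rw [if_neg (by omega)]] at hg
    omega

lemma hardH (cs : List Char) (m k : Int) (hm : 0 ≤ m) :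
    ∀ q p, p ≤ q → q < cs.length → GoodW cs m k p q →
      (q : Int) + 1 - p ≤ resSeq cs m k cs.length := by
  intro q
  induction q using Nat.strong_induction_on with
  | _ q ih =>
  intro p hpq hqn hgood
  obtain ⟨hm1, hk1⟩ := good_m_k_pos cs m k p q hpq hqn hgood
  obtain ⟨hd, hg⟩ := hgood
  by_cases hcase : jseq cs m p ≤ q
  · have hq2 : q < jseq cs m (p+1) := by
      by_contra hle
      push_neg at hle
      rw [jseq] at hle
      have hstop := extF_stop cs m p (cs.length - jseq cs m p) (jseq cs m p)
        (by have := jseq_le cs m p; omega)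
      apply hstop
      have hEq : extF cs m p (cs.length - jseq cs m p) (jseq cs m p) ≤ q := hle
      constructor
      · omega
      · have hmono := dst_right_mono cs p (show extF cs m p (cs.length - jseq cs m p) (jseq cs m p) ≤ q + 1 by omega)
        omega
    have := R_rec cs m k p q hcase hq2 ⟨hd, hg⟩ cs.length (by omega)
    omega
  · push_neg at hcase
    obtain ⟨i', hi'p, hle, hlt⟩ := jseq_cross cs m q p hcase
    have hlt' : q < extF cs m i' (cs.length - jseq cs m i') (jseq cs m i') := by
      rw [jseq] at hlt
      exact hlt
    obtain ⟨hqn', hdq⟩ := extF_mid cs m i' (cs.length - jseq cs m i') (jseq cs m i') q hle hlt'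
    have hip : i' ≤ p := by omega
    have hdl : dstN cs p (q+1) ≤ dstN cs i' (q+1) := dst_left_mono cs (q+1) hip (by omega)
    have hds := dst_snoc cs i' q (by omega) hqn'
    by_cases hdeq : (dstN cs i' (q+1) : Int) = m
    · -- same distinct count: the char sets coincide, counts only grow
      have hTsub : (wnd cs p (q+1)).toFinset ⊆ (wnd cs i' (q+1)).toFinset := by
        intro x hx
        rw [List.mem_toFinset] at *
        rw [wnd_split cs i' p (q+1) hip (by omega)]
        exact List.mem_append_right _ hx
      have hTeq := Finset.eq_of_subset_of_card_le hTsub (by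
        have e1 : (wnd cs i' (q+1)).toFinset.card = dstN cs i' (q+1) := rfl
        have e2 : (wnd cs p (q+1)).toFinset.card = dstN cs p (q+1) := rfl
        omega)
      have hfull := gs_full cs m k p (q+1) hk1 hd hg
      have hfull' : ∀ c ∈ wnd cs i' (q+1), k ≤ ((wnd cs i' (q+1)).count c : Int) := by
        intro c hc
        have hcp : c ∈ wnd cs p (q+1) := by
          rw [← List.mem_toFinset, hTeq, List.mem_toFinset]
          exact hc
        have h5 := count_left_mono cs (q+1) hip (by omega) c
        have h6 := hfull c hcp
        omega
      have hgood' : GoodW cs m k i' q := by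
        constructor
        · exact hdeq
        · rw [gA_of_full cs k i' (q+1) hk1 hfull']
          exact hdeq
      have := R_rec cs m k i' q hle hlt hgood' cs.length (by omega)
      omega
    · -- the added char is fresh there: forces k = 1 and a shorter good window
      have hne : cs.getD q ' ' ∉ wnd cs i' q := by
        intro hmem
        rw [if_pos hmem] at hds
        omega
      rw [if_neg hne] at hds
      have hdstq : (dstN cs i' q : Int) = m := by omega
      have hcnt1 : (wnd cs i' (q+1)).count (cs.getD q ' ') = 1 := by
        rw [wnd_snoc cs i' q (by omega) hqn', List.count_append, List.count_singleton_self,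
          List.count_eq_zero_of_not_mem hne]
      have hcmem : cs.getD q ' ' ∈ wnd cs p (q+1) := by
        rw [wnd_snoc cs p q hpq hqn']
        exact List.mem_append_right _ List.mem_cons_self
      have hfull := gs_full cs m k p (q+1) hk1 hd hg
      have hk_le := hfull _ hcmem
      have hcmono := count_left_mono cs (q+1) hip (by omega) (cs.getD q ' ')
      have hkeq : k = 1 := by omega
      have hiq : i' < q := (dst_pos_rev cs i' q (by omega)).1
      have hgm : gA cs k i' q = m := by
        rw [gA_of_full cs k i' q hk1 (by
          intro c hc
          rw [hkeq]
          have h7 : 0 < (wnd cs i' q).count c := List.count_pos_iff.mpr hc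
          omega)]
        exact hdstq
      have hgood' : GoodW cs m k i' (q-1) := by
        constructor
        · rw [show q - 1 + 1 = q from by omega]
          exact hdstq
        · rw [show q - 1 + 1 = q from by omega]
          exact hgm
      have hIH := ih (q-1) (by omega) i' (by omega) (by omega) hgood'
      have hnatcast : ((q - 1 : Nat) : Int) = (q : Int) - 1 := by omega
      omega

lemma A_le_B (s : String) (m k : Int) (hm : 0 ≤ m) : helper s m k ≤ helper_alt s m k := by
  rw [helperA_resSeq s m k hm, helperB_eq s m k]
  suffices h : ∀ i, i ≤ s.toList.length → resSeq s.toList m k i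
      ≤ (List.range s.toList.length).foldl
        (fun r i => (List.range' i (s.toList.length - i)).foldl (stepR s.toList m k i) r) 0 by
    exact h _ le_rfl
  intro i
  induction i with
  | zero =>
    intro _
    rw [show resSeq s.toList m k 0 = 0 from rfl]
    exact foldl_ge_start _ (fun r x => foldl_ge_start _ (stepR_ge s.toList m k x) _ r) _ 0
  | succ i ihi =>
    intro h1
    rw [resSeq]
    apply foldl_le_bound
    · intro r' x hx hr'
      unfold stepR
      split
      · rename_i hgx
        apply max_le hr'
        rw [List.mem_range'_1] at hx
        have hx1 : jseq s.toList m i ≤ x := hx.1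
        have hx2 : x < extF s.toList m i (s.toList.length - jseq s.toList m i) (jseq s.toList m i) := by
          have := jseq_mono s.toList m i
          have h9 : x < jseq s.toList m (i+1) := by omega
          rw [jseq] at h9
          exact h9
        obtain ⟨hxn, -⟩ := extF_mid s.toList m i _ (jseq s.toList m i) x hx1 hx2
        have hineq : i ≤ x := le_trans (jseq_ge_self s.toList m hm i (by omega)) hx1
        exact B_ge_good s.toList m k _ rfl i x hineq hxn hgx
      · exact hr'
    · exact ihi (by omega)

lemma B_le_A (s : String) (m k : Int) (hm : 0 ≤ m) : helper_alt s m k ≤ helper s m k := by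
  rw [helperA_resSeq s m k hm, helperB_eq s m k]
  apply foldl_le_bound
  · intro r' i hi hr'
    apply foldl_le_bound
    · intro r'' x hx hr''
      unfold stepR
      split
      · rename_i hgx
        apply max_le hr''
        rw [List.mem_range'_1] at hx
        have hxn : x < s.toList.length := by omega
        have := hardH s.toList m k hm x i hx.1 hxn hgx
        omega
      · exact hr''
    · exact hr'
  · have h0 : resSeq s.toList m k 0 = 0 := rfl
    have := resSeq_mono s.toList m k (Nat.zero_le s.toList.length)
    rw [h0] at this
    exact this

-- ===== VERDICT (by name: the statement is the Claim_ definition above) =====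
theorem helper_spec : Claim_equal_helper := by
  intro s m k hdom hpre
  unfold Spec_helper
  rcases hpre with hm | hs
  · exact le_antisymm (A_le_B s m k hm) (B_le_A s m k hm)
  · subst hs; rfl
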